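-- pv_equiv track=rewrite | github.com/confect1on/CombinatorialAlgorithms | Lab2.py | quadratic_assignment_problem
-- ===== SOURCE A (Python) =====
-- def generate_permutation(n: int):
--     result = []
--     current = [i + 1 for i in range(n)]
--     result.append(current.copy())
--     while True:
--         i = -1
--         for k in range(n - 2, -1, -1):
--             if current[k] < current[k + 1]:
--                 i = k
--                 break
--
--         if i == -1:
--             break
--         j = i + 1
--         min_value = 100000000
--         for k in range(i + 1, n):
--             if (current[i] < current[k] and current[k] < min_value):
--                 j = k
--                 min_value = current[k]
--         current[i], current[j] = current[j], current[i]
--         current[i + 1:n] = reversed(current[i + 1:n])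
--         result.append(current.copy())
--
--     return result
--
-- def quadratic_assignment_problem(n: int, c, v, a):
--
--     permutations = generate_permutation(n)
--     optimal_cost = 1_000_000_000
--     optimal_permutation = None
--     for permutation in permutations:
--         is_incorrect_permutation = False
--         for city, factory in enumerate(permutation):
--             if a[factory - 1][city]:
--                 is_incorrect_permutation = True
--                 break
--         if is_incorrect_permutation:
--             continue
--
--         cost_sum = 0
--         for i in range(n):
--             for j in range(n):
--                 cost_sum += c[i][j] * v[permutation[i] - 1][permutation[j] - 1]
--         if (cost_sum < optimal_cost):
--             optimal_permutation = permutation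
--             optimal_cost = cost_sum
--
--     return optimal_permutation
-- ===== SOURCE B (Python) =====
-- def quadratic_assignment_problem(n: int, c, v, a):
--     # Recursive backtracking: assign factories to cities 0..n-1 in ascending
--     # factory order (= lexicographic order over complete assignments), pruning
--     # a branch as soon as its factory is forbidden for the current city.
--     best_cost = 1_000_000_000
--     best = None
--
--     def search(pos, prefix, remaining):
--         nonlocal best_cost, best
--         if not remaining:
--             cost = 0
--             for i in range(n):
--                 for j in range(n):
--                     cost += c[i][j] * v[prefix[i] - 1][prefix[j] - 1]
--             if cost < best_cost:
--                 best_cost = cost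
--                 best = prefix
--             return
--         for f in remaining:
--             if a[f - 1][pos]:
--                 continue
--             search(pos + 1, prefix + [f], [g for g in remaining if g != f])
--
--     search(0, [], list(range(1, n + 1)))
--     return best
-- ===== Notes on version B (the rewrite author's own statement) =====
-- stated objective: alternative
-- what changed: Replaced the eager hand-rolled next-permutation enumeration (materialise all n! permutations, then filter and score each) by a recursive backtracking search that assigns factories to cities in ascending order, pruning a branch as soon as the factory is forbidden for the current city; feasible assignments are reached in the same lexicographic order, so the strict-< tie-break is identical.
-- outside the precondition, e.g. on quadratic_assignment_problem(1, [], [], [[1]]): A returns None, B returns None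
import Mathlib
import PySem

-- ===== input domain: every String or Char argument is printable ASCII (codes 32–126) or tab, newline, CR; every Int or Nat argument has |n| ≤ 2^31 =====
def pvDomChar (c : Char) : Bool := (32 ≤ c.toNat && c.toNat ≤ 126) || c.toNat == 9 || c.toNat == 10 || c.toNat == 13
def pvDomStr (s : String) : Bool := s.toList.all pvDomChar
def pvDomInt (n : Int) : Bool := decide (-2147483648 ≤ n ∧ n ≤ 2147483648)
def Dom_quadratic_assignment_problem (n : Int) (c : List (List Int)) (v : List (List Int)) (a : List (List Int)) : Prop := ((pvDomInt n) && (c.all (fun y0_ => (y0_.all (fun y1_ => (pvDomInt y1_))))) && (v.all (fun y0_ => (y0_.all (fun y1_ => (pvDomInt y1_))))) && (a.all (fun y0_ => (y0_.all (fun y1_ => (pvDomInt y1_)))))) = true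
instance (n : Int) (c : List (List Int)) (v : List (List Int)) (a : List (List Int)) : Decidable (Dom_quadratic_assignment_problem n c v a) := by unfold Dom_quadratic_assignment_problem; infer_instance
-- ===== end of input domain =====

-- B replaces A's eager next-permutation enumeration of all n! assignments by a recursive
-- backtracking search in ascending factory order with early pruning of forbidden factories
-- (same lexicographic visiting order, hence identical strict-< tie-breaking).

-- ===== PORT A =====

-- m[i][j] with default (under Pre_ every such access is in range, as in the Python)
def pvIdx2 (m : List (List Int)) (i j : Int) : Int :=
  PySem.List.pyGetD (PySem.List.pyGetD m i []) j 0

-- 'for k in range(n-2,-1,-1): if current[k] < current[k+1]: i = k; break' (else i = -1)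
def pvFindI (cur : List Int) : List Int → Int
  | [] => -1
  | k :: ks =>
    if PySem.List.pyGetD cur k 0 < PySem.List.pyGetD cur (k + 1) 0 then k else pvFindI cur ks

-- one iteration of the 'while True' body; none = the 'break' (i == -1)
def pvStep (n : Int) (cur : List Int) : Option (List Int) :=
  let i := pvFindI cur (PySem.List.pyRange (n - 2) (-1) (-1))
  if i = -1 then none
  else
    let jm := (PySem.List.pyRange (i + 1) n 1).foldl
      (fun (jm : Int × Int) k =>
        if PySem.List.pyGetD cur i 0 < PySem.List.pyGetD cur k 0 ∧
           PySem.List.pyGetD cur k 0 < jm.2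
        then (k, PySem.List.pyGetD cur k 0) else jm) (i + 1, 100000000)
    let j := jm.1
    let cur1 := PySem.List.pySetD (PySem.List.pySetD cur i (PySem.List.pyGetD cur j 0)) j
                  (PySem.List.pyGetD cur i 0)
    some (PySem.List.slice cur1 none (some (i + 1)) ++
          (PySem.List.slice cur1 (some (i + 1)) (some n)).reverse)

-- the 'while True' loop collecting permutations; fuel n! is enough (proved below)
def pvGenLoop (n : Int) : Nat → List Int → List (List Int) → List (List Int)
  | 0, _, acc => acc.reverse
  | fu + 1, cur, acc =>
    match pvStep n cur with
    | none => acc.reverse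
    | some cur' => pvGenLoop n fu cur' (cur' :: acc)

def pvGenPerms (n : Int) : List (List Int) :=
  let current := (PySem.List.pyRange 0 n 1).map (· + 1)
  pvGenLoop n (Nat.factorial current.length) current [current]

-- 'for city, factory in enumerate(permutation): if a[factory-1][city]: …; break'
def pvFeasBad (a : List (List Int)) : List (Int × Int) → Bool
  | [] => false
  | (city, f) :: rest =>
    if pvIdx2 a (f - 1) city ≠ 0 then true else pvFeasBad a rest

-- the nested cost_sum loops
def pvCost (n : Int) (c v : List (List Int)) (perm : List Int) : Int :=
  (PySem.List.pyRange 0 n 1).foldl (fun s i =>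
    (PySem.List.pyRange 0 n 1).foldl (fun s2 j =>
      s2 + pvIdx2 c i j *
        pvIdx2 v (PySem.List.pyGetD perm i 0 - 1) (PySem.List.pyGetD perm j 0 - 1)) s) 0

-- the body of 'for permutation in permutations'
def pvStepMain (n : Int) (c v a : List (List Int)) (st : Int × Option (List Int))
    (perm : List Int) : Int × Option (List Int) :=
  if pvFeasBad a (PySem.List.enumerate perm 0) then st
  else
    let cost := pvCost n c v perm
    if cost < st.1 then (cost, some perm) else st

def quadratic_assignment_problem (n : Int) (c : List (List Int)) (v : List (List Int)) (a : List (List Int)) : Option (List Int) :=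
  let perms := pvGenPerms n
  (perms.foldl (pvStepMain n c v a) (1000000000, none)).2

-- ===== PORT B =====

-- B's own helpers: a[i][j] access and the cost sum, as written in Source B
def pvIdx2Alt (m : List (List Int)) (i j : Int) : Int :=
  PySem.List.pyGetD (PySem.List.pyGetD m i []) j 0

def pvCostAlt (n : Int) (c v : List (List Int)) (pref : List Int) : Int :=
  (PySem.List.pyRange 0 n 1).foldl (fun s i =>
    (PySem.List.pyRange 0 n 1).foldl (fun s2 j =>
      s2 + pvIdx2Alt c i j *
        pvIdx2Alt v (PySem.List.pyGetD pref i 0 - 1) (PySem.List.pyGetD pref j 0 - 1)) s) 0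

-- backtracking: assign factories to cities 0.. in ascending order, prune forbidden ones;
-- fuel = remaining.length (exact depth of the recursion)
def pvSearch (c v a : List (List Int)) (n : Int) :
    Nat → Int → List Int → List Int → Int × Option (List Int) → Int × Option (List Int)
  | _, _, pref, [], st =>
    let cost := pvCostAlt n c v pref
    if cost < st.1 then (cost, some pref) else st
  | 0, _, _, _ :: _, st => st   -- unreachable: fuel = remaining.length
  | fu + 1, pos, pref, f0 :: rem', st =>
    (f0 :: rem').foldl (fun st f =>
      if pvIdx2Alt a (f - 1) pos ≠ 0 then st
      else pvSearch c v a n fu (pos + 1) (pref ++ [f])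
             ((f0 :: rem').filter (fun g => g != f)) st) st

def quadratic_assignment_problem_alt (n : Int) (c : List (List Int)) (v : List (List Int)) (a : List (List Int)) : Option (List Int) :=
  let rem := PySem.List.pyRange 1 (n + 1) 1
  (pvSearch c v a n rem.length 0 [] rem (1000000000, none)).2

-- ===== PRECONDITION & SPEC =====
-- Pre_ asks that the first n rows of c, v, a exist and have length ≥ n (otherwise A's
-- indexing can raise IndexError), and that n < 100000000, the sentinel A's successor
-- search uses as infinity (beyond it the hand-rolled next-permutation is no longer the
-- lexicographic successor, and such searches never finish anyway). This conservatively
-- also excludes some short-row inputs on which A happens to return None before reaching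
-- the missing entry.
def Pre_quadratic_assignment_problem (n : Int) (c : List (List Int)) (v : List (List Int)) (a : List (List Int)) : Prop :=
  n < 100000000 ∧
  n.toNat ≤ c.length ∧ n.toNat ≤ v.length ∧ n.toNat ≤ a.length ∧
  (∀ row ∈ c.take n.toNat, n.toNat ≤ row.length) ∧
  (∀ row ∈ v.take n.toNat, n.toNat ≤ row.length) ∧
  (∀ row ∈ a.take n.toNat, n.toNat ≤ row.length)
instance (n : Int) (c : List (List Int)) (v : List (List Int)) (a : List (List Int)) : Decidable (Pre_quadratic_assignment_problem n c v a) := by unfold Pre_quadratic_assignment_problem; infer_instance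

def pvWitness_quadratic_assignment_problem : Int × List (List Int) × List (List Int) × List (List Int) :=
  (2, [[0, 1], [1, 0]], [[0, 2], [2, 0]], [[0, 0], [0, 0]])

def Spec_quadratic_assignment_problem (n : Int) (c : List (List Int)) (v : List (List Int)) (a : List (List Int)) (out : Option (List Int)) : Prop := out = quadratic_assignment_problem_alt n c v a
instance (n : Int) (c : List (List Int)) (v : List (List Int)) (a : List (List Int)) (out : Option (List Int)) : Decidable (Spec_quadratic_assignment_problem n c v a out) := by unfold Spec_quadratic_assignment_problem; infer_instance

-- ===== CLAIM (what is proved, stated in full; the proofs are below) =====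
def Claim_equal_quadratic_assignment_problem : Prop := ∀ (n : Int) (c : List (List Int)) (v : List (List Int)) (a : List (List Int)), Dom_quadratic_assignment_problem n c v a → Pre_quadratic_assignment_problem n c v a → Spec_quadratic_assignment_problem n c v a (quadratic_assignment_problem n c v a)

-- ===== LEMMAS AND PROOFS =====

-- all permutations of l, lexicographically by position (heads in l's order)
def lexPerms (l : List Int) : List (List Int) :=
  if h : l = [] then [[]]
  else l.attach.flatMap (fun x => (lexPerms (l.erase x.1)).map (x.1 :: ·))
termination_by l.length
decreasing_by
  have hm : x.1 ∈ l := x.2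
  have h1 := List.length_erase_of_mem hm
  have h2 : 0 < l.length := List.length_pos_of_ne_nil h
  omega

-- structural form of one next-permutation step
def stepC : List Int → Option (List Int)
  | [] => none
  | x :: p =>
    match stepC p with
    | some q => some (x :: q)
    | none =>
      match (p.filter (fun e => decide (x < e))).getLast? with
      | none => none
      | some y => some (y :: (p.map (fun e => if e = y then x else e)).reverse)

theorem lexPerms_nil : lexPerms [] = [[]] := by simp [lexPerms]

theorem pvAttach_flatMap {α : Type} (l : List Int) (f : Int → List α) :
    l.attach.flatMap (fun x => f x.1) = l.flatMap f := by
  have h : l.attach.map (fun x => f x.1) = l.map f := by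
    rw [show (fun (x : {x // x ∈ l}) => f x.1) = f ∘ Subtype.val from rfl, ← List.map_map,
        List.attach_map_subtype_val]
  simp only [List.flatMap, h]

theorem lexPerms_ne_nil (l : List Int) (h : l ≠ []) :
    lexPerms l = l.flatMap (fun x => (lexPerms (l.erase x)).map (x :: ·)) := by
  rw [lexPerms, dif_neg h,
      pvAttach_flatMap l (fun x => (lexPerms (l.erase x)).map (x :: ·))]

theorem lexPerms_length (N : Nat) : ∀ (s : List Int), s.length ≤ N →
    (lexPerms s).length = Nat.factorial s.length := by
  induction N with
  | zero =>
    intro s hs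
    have : s = [] := List.eq_nil_of_length_eq_zero (by omega)
    subst this; simp [lexPerms_nil]
  | succ N ih =>
    intro s hs
    rcases eq_or_ne s [] with rfl | hne
    · simp [lexPerms_nil]
    · rw [lexPerms_ne_nil s hne, List.length_flatMap]
      have hpos : 0 < s.length := List.length_pos_of_ne_nil hne
      have hmap : s.map (fun x => ((lexPerms (s.erase x)).map (x :: ·)).length)
          = s.map (fun _ => Nat.factorial (s.length - 1)) := by
        apply List.map_congr_left
        intro x hx
        rw [List.length_map, ih (s.erase x) (by
          have := List.length_erase_of_mem hx; omega)]
        rw [List.length_erase_of_mem hx]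
      rw [hmap]
      have hsum : ∀ (l : List Int) (cst : Nat), (l.map (fun _ => cst)).sum = l.length * cst := by
        intro l cst
        induction l with
        | nil => simp
        | cons y ys _ => simp [List.sum_cons, Nat.succ_mul]; ring
      rw [hsum]
      obtain ⟨m, hm⟩ : ∃ m, s.length = m + 1 := ⟨s.length - 1, by omega⟩
      rw [hm]; simp [Nat.factorial_succ]

-- ---- pvStep = stepC on admissible lists ----

theorem pvGetD_cons_succ (x : Int) (p : List Int) (k : Int) (hk : 0 ≤ k) (d : Int) :
    PySem.List.pyGetD (x :: p) (k + 1) d = PySem.List.pyGetD p k d := by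
  obtain ⟨m, rfl⟩ := Int.eq_ofNat_of_zero_le hk
  have h1 : (m : Int) + 1 = ((m + 1 : Nat) : Int) := by push_cast; ring
  rw [h1, PySem.List.pyGetD_natCast, PySem.List.pyGetD_natCast]
  simp

theorem pvRange_shift (b : Int) : ∀ (a : Int),
    PySem.List.pyRange (a + 1) (b + 1) 1 = (PySem.List.pyRange a b 1).map (· + 1) := by
  intro a
  rw [PySem.List.pyRange_one, PySem.List.pyRange_one, List.map_map]
  have : b + 1 - (a + 1) = b - a := by ring
  rw [this]
  apply List.map_congr_left; intro k _; simp; ring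

theorem pvRange_desc_split (a : Int) (ha : -1 ≤ a) :
    PySem.List.pyRange (a + 1) (-1) (-1) =
      (PySem.List.pyRange a (-1) (-1)).map (· + 1) ++ [0] := by
  rw [PySem.List.pyRange_neg_one_eq_reverse, PySem.List.pyRange_neg_one_eq_reverse]
  rw [PySem.List.pyRange_one_cons (by omega), List.reverse_cons]
  rw [show (-1 : Int) + 1 + 1 = 0 + 1 from by ring, show a + 1 + 1 = (a + 1) + 1 from rfl,
      pvRange_shift, List.map_reverse]
  norm_num

theorem pvFindI_append (cur : List Int) (l1 l2 : List Int) (h : ∀ k ∈ l1, 0 ≤ k) :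
    pvFindI cur (l1 ++ l2) =
      if pvFindI cur l1 = -1 then pvFindI cur l2 else pvFindI cur l1 := by
  induction l1 with
  | nil => simp [pvFindI]
  | cons k ks ih =>
    have hk : (0 : Int) ≤ k := h k (by simp)
    by_cases hc : PySem.List.pyGetD cur k 0 < PySem.List.pyGetD cur (k + 1) 0
    · simp [pvFindI, hc]; omega
    · simp [pvFindI, hc, ih (fun x hx => h x (by simp [hx]))]

theorem pvFindI_map_shift (x : Int) (p : List Int) (ks : List Int)
    (h : ∀ k ∈ ks, 0 ≤ k) :
    pvFindI (x :: p) (ks.map (· + 1)) =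
      if pvFindI p ks = -1 then -1 else pvFindI p ks + 1 := by
  induction ks with
  | nil => simp [pvFindI]
  | cons k ks ih =>
    have hk : (0 : Int) ≤ k := h k (by simp)
    have h1 : PySem.List.pyGetD (x :: p) (k + 1) 0 = PySem.List.pyGetD p k 0 :=
      pvGetD_cons_succ x p k hk 0
    have h2 : PySem.List.pyGetD (x :: p) (k + 1 + 1) 0 = PySem.List.pyGetD p (k + 1) 0 :=
      pvGetD_cons_succ x p (k + 1) (by omega) 0
    by_cases hc : PySem.List.pyGetD p k 0 < PySem.List.pyGetD p (k + 1) 0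
    · simp [pvFindI, h1, h2, hc]; omega
    · simp [pvFindI, h1, h2, hc, ih (fun y hy => h y (by simp [hy]))]

theorem pvFindI_mem (cur : List Int) (ks : List Int) :
    pvFindI cur ks = -1 ∨ pvFindI cur ks ∈ ks := by
  induction ks with
  | nil => simp [pvFindI]
  | cons k ks ih =>
    by_cases hc : PySem.List.pyGetD cur k 0 < PySem.List.pyGetD cur (k + 1) 0
    · simp [pvFindI, hc]
    · simp only [pvFindI, if_neg hc]
      rcases ih with h | h
      · left; exact h
      · right; simp [h]

theorem pvFindI_all_false (cur : List Int) (ks : List Int)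
    (h : ∀ k ∈ ks, ¬ (PySem.List.pyGetD cur k 0 < PySem.List.pyGetD cur (k + 1) 0)) :
    pvFindI cur ks = -1 := by
  induction ks with
  | nil => simp [pvFindI]
  | cons k ks ih =>
    simp [pvFindI, h k (by simp), ih (fun y hy => h y (by simp [hy]))]

theorem pvJfold_shift (x : Int) (p : List Int) (i : Int) (hi : 0 ≤ i) :
    ∀ (ks : List Int), (∀ k ∈ ks, 0 ≤ k) → ∀ (st : Int × Int),
    (ks.map (· + 1)).foldl (fun jm k =>
        if PySem.List.pyGetD (x :: p) (i + 1) 0 < PySem.List.pyGetD (x :: p) k 0 ∧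
           PySem.List.pyGetD (x :: p) k 0 < jm.2
        then (k, PySem.List.pyGetD (x :: p) k 0) else jm) (st.1 + 1, st.2)
      = ((ks.foldl (fun jm k =>
          if PySem.List.pyGetD p i 0 < PySem.List.pyGetD p k 0 ∧
             PySem.List.pyGetD p k 0 < jm.2
          then (k, PySem.List.pyGetD p k 0) else jm) st).1 + 1,
         (ks.foldl (fun jm k =>
          if PySem.List.pyGetD p i 0 < PySem.List.pyGetD p k 0 ∧
             PySem.List.pyGetD p k 0 < jm.2
          then (k, PySem.List.pyGetD p k 0) else jm) st).2) := by
  intro ks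
  induction ks with
  | nil => intro _ st; simp
  | cons k ks ih =>
    intro hk st
    have hk0 : (0 : Int) ≤ k := hk k (by simp)
    have he1 : PySem.List.pyGetD (x :: p) (k + 1) 0 = PySem.List.pyGetD p k 0 :=
      pvGetD_cons_succ x p k hk0 0
    have he2 : PySem.List.pyGetD (x :: p) (i + 1) 0 = PySem.List.pyGetD p i 0 :=
      pvGetD_cons_succ x p i hi 0
    rw [List.map_cons, List.foldl_cons, List.foldl_cons]
    by_cases hc : PySem.List.pyGetD p i 0 < PySem.List.pyGetD p k 0 ∧
        PySem.List.pyGetD p k 0 < st.2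
    · rw [if_pos hc, if_pos (show PySem.List.pyGetD (x :: p) (i + 1) 0 <
          PySem.List.pyGetD (x :: p) (k + 1) 0 ∧
          PySem.List.pyGetD (x :: p) (k + 1) 0 < (st.1 + 1, st.2).2 from
          ⟨by rw [he1, he2]; exact hc.1, by rw [he1]; exact hc.2⟩), he1]
      simpa using ih (fun y hy => hk y (by simp [hy])) (k, PySem.List.pyGetD p k 0)
    · rw [if_neg hc, if_neg (show ¬ (PySem.List.pyGetD (x :: p) (i + 1) 0 <
          PySem.List.pyGetD (x :: p) (k + 1) 0 ∧
          PySem.List.pyGetD (x :: p) (k + 1) 0 < (st.1 + 1, st.2).2) from by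
          rw [he1, he2]; exact hc)]
      exact ih (fun y hy => hk y (by simp [hy])) st

theorem pvStep_cons_of_some (x : Int) (p : List Int) (q : List Int)
    (h : pvStep (p.length : Int) p = some q) :
    pvStep ((p.length : Int) + 1) (x :: p) = some (x :: q) := by
  cases p with
  | nil =>
    rw [pvStep, PySem.List.pyRange_neg_one_eq_nil (by norm_num)] at h
    simp [pvFindI] at h
  | cons z p' =>
    generalize hP : (z :: p') = p at *
    have hlen : 1 ≤ p.length := by rw [← hP]; simp
    rw [pvStep] at h ⊢
    set ks := PySem.List.pyRange ((p.length : Int) - 2) (-1) (-1) with hks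
    have hkpos : ∀ k ∈ ks, 0 ≤ k := by
      intro k hkk
      rw [hks] at hkk
      have := PySem.List.mem_pyRange_neg_one.1 hkk
      omega
    by_cases hi : pvFindI p ks = -1
    · rw [if_pos hi] at h; cases h
    · rw [if_neg hi] at h
      have hi0 : 0 ≤ pvFindI p ks := by
        rcases pvFindI_mem p ks with hc | hc
        · exact absurd hc hi
        · exact hkpos _ hc
      set i0 := pvFindI p ks with hi0def
      -- the index scan on (x :: p)
      have hsplit : PySem.List.pyRange ((p.length : Int) + 1 - 2) (-1) (-1)
          = ks.map (· + 1) ++ [0] := by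
        rw [show (p.length : Int) + 1 - 2 = ((p.length : Int) - 2) + 1 from by ring,
            pvRange_desc_split _ (by omega), hks]
      rw [hsplit, pvFindI_append (x :: p) _ _ (by
        intro k hkk
        obtain ⟨k', hk', rfl⟩ := List.mem_map.1 hkk
        have := hkpos k' hk'; omega)]
      rw [pvFindI_map_shift x p ks hkpos, if_neg hi]
      rw [if_neg (by omega), if_neg (by omega)]
      -- the j fold on (x :: p)
      rw [show (p.length : Int) + 1 = ((p.length : Int)) + 1 from rfl,
          show i0 + 1 + 1 = (i0 + 1) + 1 from rfl, pvRange_shift (p.length : Int) (i0 + 1)]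
      have hkpos2 : ∀ k ∈ PySem.List.pyRange (i0 + 1) (p.length : Int) 1, 0 ≤ k := by
        intro k hkk
        have := PySem.List.mem_pyRange_one.1 hkk
        omega
      rw [show ((i0 + 1) + 1, (100000000 : Int)) = ((i0 + 1, (100000000 : Int)).1 + 1,
            (i0 + 1, (100000000 : Int)).2) from rfl,
          pvJfold_shift x p i0 hi0 _ hkpos2]
      set jm := (PySem.List.pyRange (i0 + 1) (p.length : Int) 1).foldl (fun jm k =>
          if PySem.List.pyGetD p i0 0 < PySem.List.pyGetD p k 0 ∧
             PySem.List.pyGetD p k 0 < jm.2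
          then (k, PySem.List.pyGetD p k 0) else jm) (i0 + 1, 100000000) with hjm
      have hj0 : 0 ≤ jm.1 := by
        rw [hjm]
        have : ∀ (ks' : List Int), (∀ k ∈ ks', 0 ≤ k) → ∀ (st : Int × Int), 0 ≤ st.1 →
            0 ≤ (ks'.foldl (fun jm k =>
              if PySem.List.pyGetD p i0 0 < PySem.List.pyGetD p k 0 ∧
                 PySem.List.pyGetD p k 0 < jm.2
              then (k, PySem.List.pyGetD p k 0) else jm) st).1 := by
          intro ks'
          induction ks' with
          | nil => intro _ st hst; simpa using hst
          | cons k ks' ih =>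
            intro hk st hst
            rw [List.foldl_cons]
            by_cases hc : PySem.List.pyGetD p i0 0 < PySem.List.pyGetD p k 0 ∧
                PySem.List.pyGetD p k 0 < st.2
            · rw [if_pos hc]
              exact ih (fun y hy => hk y (by simp [hy])) _ (hk k (by simp))
            · rw [if_neg hc]
              exact ih (fun y hy => hk y (by simp [hy])) st hst
        exact this _ hkpos2 _ (by omega)
      -- reads and writes shift through the cons
      dsimp only at h ⊢
      rw [pvGetD_cons_succ x p jm.1 hj0 0, pvGetD_cons_succ x p i0 hi0 0]
      have hset : ∀ (l : List Int) (k : Int) (v : Int), 0 ≤ k →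
          PySem.List.pySetD (x :: l) (k + 1) v = x :: PySem.List.pySetD l k v := by
        intro l k v hk
        rw [PySem.List.pySetD_of_nonneg (x :: l) v (by omega),
            PySem.List.pySetD_of_nonneg l v hk,
            show (k + 1).toNat = k.toNat + 1 from by omega]
        rfl
      rw [hset _ _ _ hi0, hset _ _ _ hj0]
      set p1 := PySem.List.pySetD (PySem.List.pySetD p i0 (PySem.List.pyGetD p jm.1 0)) jm.1
          (PySem.List.pyGetD p i0 0) with hp1
      have e1 : PySem.List.slice (x :: p1) none (some (i0 + 1 + 1))
          = x :: PySem.List.slice p1 none (some (i0 + 1)) := by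
        rw [PySem.List.slice_to (x :: p1) (by omega), PySem.List.slice_to p1 (by omega),
            show (i0 + 1 + 1).toNat = (i0 + 1).toNat + 1 from by omega, List.take_succ_cons]
      have e2 : PySem.List.slice (x :: p1) (some (i0 + 1 + 1)) (some ((p.length : Int) + 1))
          = PySem.List.slice p1 (some (i0 + 1)) (some (p.length : Int)) := by
        rw [PySem.List.slice_toNat (x :: p1) (by omega) (by omega),
            PySem.List.slice_toNat p1 (by omega) (by omega),
            show (i0 + 1 + 1).toNat = (i0 + 1).toNat + 1 from by omega, List.drop_succ_cons,
            show ((p.length : Int) + 1).toNat - ((i0 + 1).toNat + 1)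
              = (p.length : Int).toNat - (i0 + 1).toNat from by omega]
      rw [e1, e2]
      injection h with h
      rw [← h]
      simp

theorem stepC_none_of_desc (l : List Int) (h : l.Pairwise (fun a b => b ≤ a)) :
    stepC l = none := by
  induction l with
  | nil => rfl
  | cons x p ih =>
    have h1 : stepC p = none := ih (List.Pairwise.of_cons h)
    have h2 : p.filter (fun e => decide (x < e)) = [] := by
      rw [List.filter_eq_nil_iff]
      intro e he
      have := (List.pairwise_cons.1 h).1 e he
      simp; omega
    simp [stepC, h1, h2]

theorem stepC_desc_of_none (l : List Int) (h : stepC l = none) :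
    l.Pairwise (fun a b => b ≤ a) := by
  induction l with
  | nil => simp
  | cons x p ih =>
    rw [stepC] at h
    cases hp : stepC p with
    | some q => rw [hp] at h; simp at h
    | none =>
      rw [hp] at h
      cases hg : (p.filter (fun e => decide (x < e))).getLast? with
      | some y => rw [hg] at h; simp at h
      | none =>
        have hfil : p.filter (fun e => decide (x < e)) = [] :=
          List.getLast?_eq_none_iff.1 hg
        rw [List.filter_eq_nil_iff] at hfil
        exact List.pairwise_cons.2 ⟨fun e he => by have := hfil e he; simp at this; omega,
          ih hp⟩

theorem pvSet_eq_map_replace (p : List Int) (k : Nat) (x y : Int)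
    (hnd : p.Nodup) (hk : k < p.length) (hy : p[k] = y) :
    p.set k x = p.map (fun e => if e = y then x else e) := by
  induction p generalizing k with
  | nil => simp at hk
  | cons b rest ih =>
    rcases List.nodup_cons.1 hnd with ⟨hbn, hrest⟩
    cases k with
    | zero =>
      have hb : b = y := by simpa using hy
      subst hb
      simp only [List.set_cons_zero, List.map_cons]
      congr 1
      exact ((List.map_congr_left
        (fun e he => if_neg (fun hc : e = b => hbn (hc ▸ he)))).trans (by simp)).symm
    | succ m =>
      simp at hk hy
      have hmem : y ∈ rest := hy ▸ (rest.getElem_mem hk)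
      have hne : b ≠ y := fun hcontr => hbn (hcontr ▸ hmem)
      simp only [List.set_cons_succ, List.map_cons, if_neg hne]
      rw [ih m hrest hk hy]

theorem pvGetLast?_cons_of_some {l : List Int} {e y : Int} (h : l.getLast? = some y) :
    (e :: l).getLast? = some y := by
  cases l with
  | nil => simp at h
  | cons a t => rw [List.getLast?_cons_cons]; exact h

theorem pvJfold_enum (x : Int) : ∀ (p : List Int) (s : Int) (st : Int × Int),
    p.Pairwise (· > ·) → (∀ e ∈ p, e < st.2) →
    (PySem.List.enumerate p s).foldl
      (fun jm q => if x < q.2 ∧ q.2 < jm.2 then (q.1 + 1, q.2) else jm) st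
    = (match (p.filter (fun e => decide (x < e))).getLast? with
       | none => st
       | some y => (s + (p.idxOf y : Int) + 1, y)) := by
  intro p
  induction p with
  | nil => intro s st _ _; simp
  | cons e rest ih =>
    intro s st hpw hb
    rw [PySem.List.enumerate_cons, List.foldl_cons]
    obtain ⟨hegt, hrest⟩ := List.pairwise_cons.1 hpw
    by_cases hxe : x < e
    · rw [if_pos ⟨hxe, hb e (by simp)⟩]
      rw [ih (s + 1) (s + 1, e) hrest (fun r hr => hegt r hr)]
      rw [List.filter_cons_of_pos (by simp [hxe])]
      cases hrf : (rest.filter (fun e' => decide (x < e'))).getLast? with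
      | none =>
        have hfil : rest.filter (fun e' => decide (x < e')) = [] :=
          List.getLast?_eq_none_iff.1 hrf
        rw [hfil]
        simp [List.idxOf_cons_self]
      | some y =>
        have hymem : y ∈ rest := (List.mem_filter.1 (List.mem_of_getLast? hrf)).1
        have hyne : e ≠ y := fun hc => by have := hegt y hymem; omega
        rw [pvGetLast?_cons_of_some hrf]
        dsimp only
        rw [List.idxOf_cons_ne rest hyne]
        simp only [Prod.mk.injEq]
        constructor
        · push_cast; ring
        · trivial
    · rw [if_neg (fun hc => hxe hc.1)]
      rw [ih (s + 1) st hrest (fun r hr => lt_trans (hegt r hr) (hb e (by simp)))]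
      rw [List.filter_cons_of_neg (by simp [hxe])]
      cases hrf : (rest.filter (fun e' => decide (x < e'))).getLast? with
      | none => rfl
      | some y =>
        have hyfil := List.mem_filter.1 (List.mem_of_getLast? hrf)
        have hxy : x < y := by simpa using hyfil.2
        have hyne : e ≠ y := by omega
        dsimp only
        rw [List.idxOf_cons_ne rest hyne]
        simp only [Prod.mk.injEq]
        constructor
        · push_cast; ring
        · trivial

theorem pvG1 (cur : List Int) (hnd : cur.Nodup) (hb : ∀ z ∈ cur, z < 100000000) :
    pvStep (cur.length : Int) cur = stepC cur := by
  induction cur with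
  | nil =>
    rw [pvStep, PySem.List.pyRange_neg_one_eq_nil (by norm_num)]
    simp [pvFindI, stepC]
  | cons x p ih =>
    have hlen1 : ((x :: p).length : Int) = (p.length : Int) + 1 := by simp
    rw [hlen1]
    have hndp : p.Nodup := (List.nodup_cons.1 hnd).2
    have hbp : ∀ z ∈ p, z < 100000000 := fun z hz => hb z (by simp [hz])
    cases hp : stepC p with
    | some q =>
      have hA : pvStep (p.length : Int) p = some q := by rw [ih hndp hbp, hp]
      rw [pvStep_cons_of_some x p q hA, stepC, hp]
    | none =>
      have hdesc : p.Pairwise (fun a b => b ≤ a) := stepC_desc_of_none p hp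
      have hstrict : p.Pairwise (· > ·) :=
        (hdesc.and hndp).imp (fun hab => lt_of_le_of_ne hab.1 (Ne.symm hab.2))
      cases p with
      | nil =>
        rw [pvStep, PySem.List.pyRange_neg_one_eq_nil (by norm_num)]
        simp [pvFindI, stepC]
      | cons z p' =>
        generalize hP : (z :: p') = p at *
        have hplen : 1 ≤ p.length := by rw [← hP]; simp
        have hz0 : PySem.List.pyGetD p 0 0 = z := by rw [← hP]; simp [PySem.List.pyGetD_zero_cons]
        rw [pvStep]
        set ks := PySem.List.pyRange ((p.length : Int) - 2) (-1) (-1) with hks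
        have hkpos : ∀ k ∈ ks, 0 ≤ k := by
          intro k hkk
          rw [hks] at hkk
          have := PySem.List.mem_pyRange_neg_one.1 hkk
          omega
        have hinner : pvFindI p ks = -1 := by
          apply pvFindI_all_false
          intro k hkk
          have hkb := PySem.List.mem_pyRange_neg_one.1 (hks ▸ hkk)
          have hk0 : 0 ≤ k := by omega
          have hklt : k < (p.length : Int) := by omega
          have hklt1 : k + 1 < (p.length : Int) := by omega
          have e1 := PySem.List.pyGetD_eq_getElem p 0 hk0 hklt
          have e2 := PySem.List.pyGetD_eq_getElem p 0 (show (0:Int) ≤ k + 1 by omega) hklt1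
          simp only [e1, e2]
          have hpair := List.pairwise_iff_getElem.1 hstrict k.toNat (k.toNat + 1)
            (by omega) (by omega) (by omega)
          intro hcontra
          have h4 : p[(k + 1).toNat]'(by omega) = p[k.toNat + 1]'(by omega) := by
            congr 1
            omega
          rw [h4] at hcontra
          omega
        have hsplit : PySem.List.pyRange ((p.length : Int) + 1 - 2) (-1) (-1)
            = ks.map (· + 1) ++ [0] := by
          rw [show (p.length : Int) + 1 - 2 = ((p.length : Int) - 2) + 1 from by ring,
              pvRange_desc_split _ (by omega), hks]
        rw [hsplit, pvFindI_append (x :: p) _ _ (by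
          intro k hkk
          obtain ⟨k', hk', rfl⟩ := List.mem_map.1 hkk
          have := hkpos k' hk'; omega)]
        rw [pvFindI_map_shift x p ks hkpos, if_pos hinner]
        have hget1 : PySem.List.pyGetD (x :: p) (0 + 1) 0 = z := by
          rw [pvGetD_cons_succ x p 0 le_rfl 0, hz0]
        by_cases hxz : x < z
        · -- there is a successor block head: i = 0
          have hfind0 : pvFindI (x :: p) [0] = 0 := by
            rw [pvFindI, hget1, PySem.List.pyGetD_zero_cons, if_pos hxz]
          rw [hfind0, if_pos (show (-1 : Int) = -1 from rfl),
              if_neg (show ¬(0 : Int) = -1 by norm_num)]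
          -- the j fold
          have hconv : (PySem.List.pyRange (0 + 1) ((p.length : Int) + 1) 1).foldl
              (fun (jm : Int × Int) k =>
                if PySem.List.pyGetD (x :: p) 0 0 < PySem.List.pyGetD (x :: p) k 0 ∧
                   PySem.List.pyGetD (x :: p) k 0 < jm.2
                then (k, PySem.List.pyGetD (x :: p) k 0) else jm) (0 + 1, 100000000)
              = (PySem.List.enumerate p 0).foldl
                (fun jm q => if x < q.2 ∧ q.2 < jm.2 then (q.1 + 1, q.2) else jm)
                (0 + 1, 100000000) := by
            rw [pvRange_shift, List.foldl_map]
            rw [PySem.List.foldl_congr_mem _ _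
              (fun (jm : Int × Int) k =>
                if x < PySem.List.pyGetD p k 0 ∧ PySem.List.pyGetD p k 0 < jm.2
                then (k + 1, PySem.List.pyGetD p k 0) else jm) _
              (by
                intro acc k hkk
                have hk0 : (0 : Int) ≤ k := by
                  have := PySem.List.mem_pyRange_one.1 hkk; omega
                rw [pvGetD_cons_succ x p k hk0 0, PySem.List.pyGetD_zero_cons])]
            rw [PySem.List.enumerate_eq_map_pyRange p 0, List.foldl_map]
            simp [PySem.List.len_eq]
          rw [hconv, pvJfold_enum x p 0 (0 + 1, 100000000) hstrict (by
            intro e he; have := hbp e he; simp; omega)]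
          have hgt : z ∈ p.filter (fun e => decide (x < e)) := by
            rw [← hP]; simp [hxz]
          cases hlast : (p.filter (fun e => decide (x < e))).getLast? with
          | none =>
            rw [List.getLast?_eq_none_iff.1 hlast] at hgt
            simp at hgt
          | some y =>
            have hymem : y ∈ p := (List.mem_filter.1 (List.mem_of_getLast? hlast)).1
            have hylt : p.idxOf y < p.length := List.idxOf_lt_length_of_mem hymem
            have hyget : p[p.idxOf y]'hylt = y := List.getElem_idxOf hylt
            -- compute the rest
            dsimp only
            have hread : PySem.List.pyGetD (x :: p) (0 + (p.idxOf y : Int) + 1) 0 = y := by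
              rw [show (0 : Int) + (p.idxOf y : Int) + 1 = (p.idxOf y : Int) + 1 from by ring,
                  pvGetD_cons_succ x p _ (by positivity) 0,
                  PySem.List.pyGetD_natCast]
              rw [List.getD_eq_getElem p 0 hylt]
              exact hyget
            rw [hread, PySem.List.pyGetD_zero_cons]
            have hset1 : PySem.List.pySetD (x :: p) 0 y = y :: p := by
              rw [PySem.List.pySetD_of_nonneg _ y le_rfl]
              rfl
            rw [hset1]
            have hset2 : PySem.List.pySetD (y :: p) (0 + (p.idxOf y : Int) + 1) x
                = y :: p.set (p.idxOf y) x := by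
              rw [PySem.List.pySetD_of_nonneg _ x (by positivity),
                  show (0 + (p.idxOf y : Int) + 1).toNat = p.idxOf y + 1 from by omega]
              rfl
            rw [hset2]
            have hslice1 : PySem.List.slice (y :: p.set (p.idxOf y) x) none (some (0 + 1))
                = [y] := by
              rw [PySem.List.slice_to _ (by norm_num)]
              rfl
            have hslice2 : PySem.List.slice (y :: p.set (p.idxOf y) x) (some (0 + 1))
                (some ((p.length : Int) + 1)) = p.set (p.idxOf y) x := by
              rw [PySem.List.slice_toNat _ (by norm_num) (by positivity),
                  show ((0 : Int) + 1).toNat = 1 from by norm_num, List.drop_succ_cons,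
                  List.drop_zero]
              apply List.take_of_length_le
              simp
            rw [hslice1, hslice2]
            rw [stepC, hp, hlast]
            dsimp only
            rw [pvSet_eq_map_replace p (p.idxOf y) x y hndp hylt hyget]
            simp
        · -- no ascent at all: both sides are none
          have hfind0 : pvFindI (x :: p) [0] = -1 := by
            rw [pvFindI, hget1, PySem.List.pyGetD_zero_cons, if_neg hxz]
            rfl
          rw [hfind0, if_pos (show (-1 : Int) = -1 from rfl),
              if_pos (show (-1 : Int) = -1 from rfl)]
          have hgt : p.filter (fun e => decide (x < e)) = [] := by
            rw [List.filter_eq_nil_iff]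
            intro e he
            have hez : e ≤ z := by
              rw [← hP] at he hdesc
              rcases List.mem_cons.1 he with rfl | he'
              · exact le_refl e
              · have := (List.pairwise_cons.1 hdesc).1 e he'; omega
            simp; omega
          rw [stepC, hp, hgt]
          rfl

theorem stepC_perm (cur d : List Int) (hnd : cur.Nodup) (h : stepC cur = some d) :
    d.Perm cur := by
  induction cur generalizing d with
  | nil => simp [stepC] at h
  | cons x p ih =>
    rw [stepC] at h
    cases hp : stepC p with
    | some q =>
      rw [hp] at h
      injection h with h; subst h
      exact (ih q (List.nodup_cons.1 hnd).2 hp).cons x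
    | none =>
      rw [hp] at h
      cases hg : (p.filter (fun e => decide (x < e))).getLast? with
      | none => rw [hg] at h; cases h
      | some y =>
        rw [hg] at h
        injection h with h; subst h
        have hy : y ∈ p := List.mem_filter.1 (List.mem_of_getLast? hg) |>.1
        obtain ⟨p1, p2, rfl⟩ := List.mem_iff_append.mp hy
        have hnd' := hnd
        rw [List.nodup_cons] at hnd'
        have hynotp1 : y ∉ p1 := by
          have := hnd'.2
          rw [List.nodup_append] at this
          intro hc; exact this.2.2 y hc y (by simp) rfl
        have hynotp2 : y ∉ p2 := by
          have := hnd'.2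
          rw [List.nodup_append] at this
          have := this.2.1
          rw [List.nodup_cons] at this
          exact this.1
        have hmap : (p1 ++ y :: p2).map (fun e => if e = y then x else e)
            = p1 ++ x :: p2 := by
          rw [List.map_append, List.map_cons, if_pos rfl]
          congr 1
          · exact (List.map_congr_left
              (fun e he => if_neg (fun hc : e = y => hynotp1 (hc ▸ he)))).trans (by simp)
          · congr 1
            exact (List.map_congr_left
              (fun e he => if_neg (fun hc : e = y => hynotp2 (hc ▸ he)))).trans (by simp)
        rw [hmap]
        exact (((p1 ++ x :: p2).reverse_perm).cons y).trans
          ((((List.perm_middle).cons y).trans (List.Perm.swap x y _)).trans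
            ((List.perm_middle.symm).cons x))

-- ---- the chain of steps from the sorted list is lexPerms ----

inductive PartC : List Int → List (List Int) → List Int → Prop
  | last (cur : List Int) : PartC cur [cur] cur
  | step {cur c' e : List Int} {l : List (List Int)} :
      stepC cur = some c' → PartC c' l e → PartC cur (cur :: l) e

theorem PartC_head {cur e : List Int} {l : List (List Int)} (h : PartC cur l e) :
    ∃ t, l = cur :: t := by
  cases h <;> exact ⟨_, rfl⟩

theorem PartC_append {a b c e : List Int} {l l' : List (List Int)}
    (h1 : PartC a l b) (hs : stepC b = some c) (h2 : PartC c l' e) :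
    PartC a (l ++ l') e := by
  induction h1 with
  | last cur => exact PartC.step hs h2
  | step hstep _ ih => exact PartC.step hstep (ih hs)

theorem PartC_block (x : Int) {p e : List Int} {l : List (List Int)}
    (h : PartC p l e) : PartC (x :: p) (l.map (x :: ·)) (x :: e) := by
  induction h with
  | last cur => exact PartC.last (x :: cur)
  | step hstep _ ih =>
    exact PartC.step (by rw [stepC, hstep]) ih

theorem PartC_mem_perm {cur e : List Int} {l : List (List Int)} (h : PartC cur l e)
    (hnd : cur.Nodup) : ∀ d ∈ l, d.Perm cur := by
  induction h with
  | last c => intro d hd; simp at hd; subst hd; exact List.Perm.refl d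
  | step hstep hpart ih =>
    intro d hd
    rename_i cur' c' e' l'
    rcases List.mem_cons.1 hd with rfl | hd'
    · exact List.Perm.refl d
    · have hperm := stepC_perm cur' c' hnd hstep
      have := ih (hperm.nodup_iff.mpr hnd) d hd'
      exact this.trans hperm

theorem pvJunction (u w : List Int) (x x' : Int)
    (hs : (u ++ x :: x' :: w).Pairwise (· < ·)) :
    stepC (x :: (u ++ x' :: w).reverse) = some (x' :: (u ++ x :: w)) := by
  obtain ⟨hu, hxs, hcross⟩ := List.pairwise_append.1 hs
  obtain ⟨hxlt, hx's⟩ := List.pairwise_cons.1 hxs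
  obtain ⟨hx'lt, _⟩ := List.pairwise_cons.1 hx's
  -- u < x < x' < w pointwise
  have hs' : (u ++ x' :: w).Pairwise (· < ·) :=
    List.Pairwise.sublist (List.Sublist.append_left (List.sublist_cons_self x _) u) hs
  have hdesc : (u ++ x' :: w).reverse.Pairwise (fun a b => b ≤ a) := by
    rw [List.pairwise_reverse]
    exact hs'.imp (fun h => le_of_lt h)
  have hnone : stepC ((u ++ x' :: w).reverse) = none := stepC_none_of_desc _ hdesc
  have hfil : ((u ++ x' :: w).reverse).filter (fun e => decide (x < e))
      = w.reverse ++ [x'] := by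
    rw [List.filter_reverse, List.filter_append]
    have h1 : u.filter (fun e => decide (x < e)) = [] := by
      rw [List.filter_eq_nil_iff]
      intro e he
      have := hcross e he x (by simp)
      simp; omega
    have h2 : (x' :: w).filter (fun e => decide (x < e)) = x' :: w := by
      rw [List.filter_eq_self]
      intro e he
      rcases List.mem_cons.1 he with rfl | hew
      · simp [hxlt e (by simp)]
      · simp [hxlt e (by simp [hew])]
    rw [h1, h2]
    simp
  have hlast : (((u ++ x' :: w).reverse).filter (fun e => decide (x < e))).getLast?
      = some x' := by rw [hfil, List.getLast?_concat]
  have hmap : ((u ++ x' :: w).reverse.map (fun e => if e = x' then x else e)).reverse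
      = u ++ x :: w := by
    have hrr : ((u ++ x' :: w).reverse.map (fun e => if e = x' then x else e)).reverse
        = (u ++ x' :: w).map (fun e => if e = x' then x else e) := by
      simp
    rw [hrr, List.map_append, List.map_cons, if_pos rfl]
    congr 1
    · exact (List.map_congr_left (fun e he => if_neg (by
        have := hcross e he x' (by simp); omega))).trans (by simp)
    · congr 1
      exact (List.map_congr_left (fun e he => if_neg (by
        have := hx'lt e he; omega))).trans (by simp)
  rw [stepC, hnone, hlast]
  dsimp only
  rw [hmap]

theorem pvAuxRun : ∀ (tl u : List Int) (x : Int),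
    (∀ t : List Int, t.length ≤ u.length + tl.length → t.Pairwise (· < ·) →
       PartC t (lexPerms t) t.reverse) →
    (u ++ x :: tl).Pairwise (· < ·) →
    PartC (x :: (u ++ tl))
      ((x :: tl).flatMap (fun z => (lexPerms ((u ++ x :: tl).erase z)).map (z :: ·)))
      (u ++ x :: tl).reverse := by
  intro tl
  induction tl with
  | nil =>
    intro u x HR hs
    have hxu : x ∉ u := by
      intro hc
      have := (List.pairwise_append.1 hs).2.2 x hc x (by simp)
      omega
    have her : (u ++ [x]).erase x = u := by
      rw [List.erase_append_right _ hxu, List.erase_cons_head]; simp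
    have hu : PartC u (lexPerms u) u.reverse :=
      HR u (by simp) (List.Pairwise.sublist (List.sublist_append_left u [x]) hs)
    have hb := PartC_block x hu
    simpa [her, List.flatMap_cons] using hb
  | cons x' w ih =>
    intro u x HR hs
    have hxu : x ∉ u := by
      intro hc
      have := (List.pairwise_append.1 hs).2.2 x hc x (by simp)
      omega
    have hs' : (u ++ x' :: w).Pairwise (· < ·) :=
      List.Pairwise.sublist (List.Sublist.append_left (List.sublist_cons_self x _) u) hs
    have hb1 : PartC (u ++ x' :: w) (lexPerms (u ++ x' :: w)) (u ++ x' :: w).reverse :=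
      HR _ (by simp) hs'
    have hblock := PartC_block x hb1
    have hjun := pvJunction u w x x' hs
    have hs'' : ((u ++ [x]) ++ x' :: w).Pairwise (· < ·) := by
      simpa [List.append_assoc] using hs
    have hIH := ih (u ++ [x]) x' (fun t ht hp => HR t (by simp at ht ⊢; omega) hp) hs''
    rw [show (u ++ [x]) ++ x' :: w = u ++ x :: x' :: w from by simp] at hIH
    rw [show (u ++ [x]) ++ w = u ++ x :: w from by simp] at hIH
    have hcomb := PartC_append hblock hjun hIH
    have her : (u ++ x :: x' :: w).erase x = u ++ x' :: w := by
      rw [List.erase_append_right _ hxu, List.erase_cons_head]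
    rw [List.flatMap_cons]
    have : ((x' :: w).flatMap
        (fun z => (lexPerms ((u ++ x :: x' :: w).erase z)).map (z :: ·)))
        = ((x' :: w).flatMap
        (fun z => (lexPerms ((u ++ [x] ++ x' :: w).erase z)).map (z :: ·))) := by
      simp [List.append_assoc]
    rw [her]
    simpa using hcomb

theorem pvSortedRun (N : Nat) : ∀ (s : List Int), s.length ≤ N →
    s.Pairwise (· < ·) → PartC s (lexPerms s) s.reverse := by
  induction N with
  | zero =>
    intro s hl _
    have : s = [] := List.eq_nil_of_length_eq_zero (by omega)
    subst this
    rw [lexPerms_nil]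
    exact PartC.last []
  | succ N ih =>
    intro s hl hs
    cases s with
    | nil => rw [lexPerms_nil]; exact PartC.last []
    | cons x tl =>
      have HR : ∀ t : List Int, t.length ≤ ([] : List Int).length + tl.length →
          t.Pairwise (· < ·) → PartC t (lexPerms t) t.reverse := by
        intro t ht hp
        exact ih t (by simp at ht hl; omega) hp
      have := pvAuxRun tl [] x HR (by simpa using hs)
      rw [lexPerms_ne_nil (x :: tl) (by simp)]
      simpa using this

theorem pvGenLoopEq (n : Int) {cur e : List Int} {l : List (List Int)}
    (h : PartC cur l e) (hend : stepC e = none)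
    (hinv : ∀ d ∈ l, d.Nodup ∧ (∀ z ∈ d, z < 100000000) ∧ (n : Int) = (d.length : Int)) :
    ∀ (fuel : Nat) (acc : List (List Int)), l.length ≤ fuel + 1 →
      pvGenLoop n fuel cur acc = acc.reverse ++ l.tail := by
  induction h with
  | last cur =>
    intro fuel acc _
    obtain ⟨h1, h2, h3⟩ := hinv cur (by simp)
    cases fuel with
    | zero => simp [pvGenLoop]
    | succ fu =>
      have : pvStep n cur = none := by
        rw [h3, pvG1 cur h1 h2, hend]
      simp [pvGenLoop, this]
  | step hstep hpart ih =>
    rename_i cur c' e l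
    intro fuel acc hlen
    obtain ⟨t, rfl⟩ := PartC_head hpart
    cases fuel with
    | zero => simp at hlen
    | succ fu =>
      obtain ⟨h1, h2, h3⟩ := hinv cur (by simp)
      have hstep' : pvStep n cur = some c' := by
        rw [h3, pvG1 cur h1 h2, hstep]
      rw [pvGenLoop, hstep']
      show pvGenLoop n fu c' (c' :: acc) = _
      have := ih hend (fun d hd => hinv d (by simp at hd ⊢; tauto)) fu (c' :: acc)
        (by simp at hlen ⊢; omega)
      rw [this]
      simp

theorem pvGenPerms_eq (n : Int) (hn : n < 100000000) :
    pvGenPerms n = lexPerms ((PySem.List.pyRange 0 n 1).map (· + 1)) := by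
  by_cases hpos : n ≤ 0
  · have hnil : PySem.List.pyRange 0 n 1 = [] := PySem.List.pyRange_one_eq_nil (by omega)
    have hstep : pvStep n [] = none := by
      rw [pvStep, PySem.List.pyRange_neg_one_eq_nil (by omega)]
      simp [pvFindI]
    rw [pvGenPerms, hnil]
    simp [pvGenLoop, hstep, lexPerms_nil]
  · have hpos' : 0 < n := by omega
    set s := (PySem.List.pyRange 0 n 1).map (· + 1) with hs
    have hsort : s.Pairwise (· < ·) := by
      exact List.Pairwise.map _ (fun a b hab => by omega)
        (PySem.List.pairwise_lt_pyRange_one 0 n)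
    have hnodup : s.Nodup := hsort.imp (fun h => ne_of_lt h)
    have hbound : ∀ z ∈ s, z < 100000000 := by
      intro z hz
      rw [hs] at hz
      obtain ⟨k, hk, rfl⟩ := List.mem_map.1 hz
      have := (PySem.List.mem_pyRange_one.1 hk)
      omega
    have hlen : (s.length : Int) = n := by
      rw [hs, List.length_map, PySem.List.length_pyRange_one]
      omega
    have hrun : PartC s (lexPerms s) s.reverse := pvSortedRun s.length s le_rfl hsort
    have hend : stepC s.reverse = none := by
      apply stepC_none_of_desc
      rw [List.pairwise_reverse]
      exact hsort.imp (fun h => le_of_lt h)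
    have hinv : ∀ d ∈ lexPerms s, d.Nodup ∧ (∀ z ∈ d, z < 100000000) ∧
        (n : Int) = (d.length : Int) := by
      intro d hd
      have hperm := PartC_mem_perm hrun hnodup d hd
      refine ⟨hperm.nodup_iff.mpr hnodup, fun z hz => hbound z (hperm.subset hz), ?_⟩
      rw [hperm.length_eq, hlen]
    have hflen : (lexPerms s).length ≤ Nat.factorial s.length + 1 := by
      rw [lexPerms_length s.length s le_rfl]; omega
    have := pvGenLoopEq n hrun hend hinv (Nat.factorial s.length) [s] hflen
    obtain ⟨t, ht⟩ := PartC_head hrun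
    rw [pvGenPerms]
    rw [show ((PySem.List.pyRange 0 n 1).map (· + 1)) = s from rfl]
    rw [this, ht]
    simp

-- ---- backtracking = fold of A's loop body over lexPerms ----

theorem pvFeasBad_eq_any (a : List (List Int)) (l : List (Int × Int)) :
    pvFeasBad a l = l.any (fun q => decide (pvIdx2 a (q.2 - 1) q.1 ≠ 0)) := by
  induction l with
  | nil => rfl
  | cons q rest ih =>
    obtain ⟨city, f⟩ := q
    by_cases hc : pvIdx2 a (f - 1) city ≠ 0
    · simp [pvFeasBad, hc]
    · simp [pvFeasBad, hc, ih]

theorem pvSearch_eq (c v a : List (List Int)) (n : Int) (N : Nat) :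
    ∀ (rem : List Int), rem.length ≤ N → rem.Nodup →
    ∀ (pref : List Int) (st : Int × Option (List Int)),
      (∀ q ∈ PySem.List.enumerate pref 0, pvIdx2 a (q.2 - 1) q.1 = 0) →
      pvSearch c v a n rem.length (pref.length : Int) pref rem st
        = ((lexPerms rem).map (pref ++ ·)).foldl (pvStepMain n c v a) st := by
  induction N with
  | zero =>
    intro rem hle hnd pref st hfeas
    have hnil : rem = [] := List.eq_nil_of_length_eq_zero (by omega)
    subst hnil
    have hfb : pvFeasBad a (PySem.List.enumerate pref 0) = false := by
      rw [pvFeasBad_eq_any, List.any_eq_false]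
      intro q hq
      simpa using hfeas q hq
    rw [lexPerms_nil]
    simp only [List.map_cons, List.map_nil, List.foldl_cons, List.foldl_nil,
      List.append_nil]
    rw [pvStepMain, if_neg (by simp [hfb])]
    rfl
  | succ N ih =>
    intro rem hle hnd pref st hfeas
    cases rem with
    | nil =>
      have hfb : pvFeasBad a (PySem.List.enumerate pref 0) = false := by
        rw [pvFeasBad_eq_any, List.any_eq_false]
        intro q hq
        simpa using hfeas q hq
      rw [lexPerms_nil]
      simp only [List.map_cons, List.map_nil, List.foldl_cons, List.foldl_nil,
        List.append_nil]
      rw [pvStepMain, if_neg (by simp [hfb])]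
      rfl
    | cons f0 rem' =>
      rw [lexPerms_ne_nil (f0 :: rem') (by simp), List.map_flatMap, List.foldl_flatMap]
      rw [show (f0 :: rem').length = rem'.length + 1 from rfl]
      rw [pvSearch]
      apply PySem.List.foldl_congr_mem
      intro acc f hf
      by_cases hblk : pvIdx2Alt a (f - 1) (pref.length : Int) ≠ 0
      · rw [if_pos hblk]
        have hall : ∀ perm ∈ ((lexPerms ((f0 :: rem').erase f)).map (f :: ·)).map (pref ++ ·),
            pvStepMain n c v a acc perm = acc ∨ True := fun _ _ => Or.inr trivial
        rw [PySem.List.foldl_congr_mem _ _ (fun acc _ => acc) _ (by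
          intro acc' perm hperm
          rw [List.map_map] at hperm
          obtain ⟨q, hq, rfl⟩ := List.mem_map.1 hperm
          rw [pvStepMain, if_pos (by
            rw [pvFeasBad_eq_any, List.any_eq_true]
            have hblk1 : pvIdx2 a (f - 1) (pref.length : Int) ≠ 0 := hblk
            refine ⟨((pref.length : Int), f), ?_, by simpa using hblk1⟩
            show _ ∈ PySem.List.enumerate (pref ++ f :: q) 0
            rw [List.append_cons, List.append_assoc, PySem.List.enumerate_append]
            apply List.mem_append_right
            rw [List.singleton_append, PySem.List.enumerate_cons]
            simp)])]
        rw [PySem.List.foldl_ignore]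
      · rw [if_neg hblk]
        rw [not_not] at hblk
        have hblk0 : pvIdx2 a (f - 1) (pref.length : Int) = 0 := hblk
        have hmemf : f ∈ f0 :: rem' := hf
        have herase : (f0 :: rem').filter (fun g => g != f) = (f0 :: rem').erase f :=
          (List.Nodup.erase_eq_filter hnd f).symm
        have hlenerase : ((f0 :: rem').erase f).length = rem'.length := by
          rw [List.length_erase_of_mem hmemf]
          rfl
        have hpos1 : (pref.length : Int) + 1 = ((pref ++ [f]).length : Int) := by
          simp
        have hfeas' : ∀ q ∈ PySem.List.enumerate (pref ++ [f]) 0,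
            pvIdx2 a (q.2 - 1) q.1 = 0 := by
          intro q hq
          rw [PySem.List.enumerate_append] at hq
          rcases List.mem_append.1 hq with hq1 | hq2
          · exact hfeas q hq1
          · rw [PySem.List.enumerate_cons] at hq2
            simp at hq2
            rw [hq2]
            simpa using hblk0
        have hle' : rem'.length ≤ N := by simpa using hle
        have := ih ((f0 :: rem').erase f) (by rw [hlenerase]; exact hle') (hnd.erase f)
          (pref ++ [f]) acc hfeas'
        rw [hlenerase] at this
        rw [herase, hpos1, this, List.map_map]
        apply congrArg (List.foldl (pvStepMain n c v a) acc)
        apply List.map_congr_left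
        intro q _
        simp

-- ===== VERDICT (by name: the statement is the Claim_ definition above) =====
theorem quadratic_assignment_problem_spec : Claim_equal_quadratic_assignment_problem := by
  intro n c v a _hdom hpre
  obtain ⟨hn, -⟩ := hpre
  unfold Spec_quadratic_assignment_problem
  simp only [quadratic_assignment_problem, quadratic_assignment_problem_alt]
  set s := (PySem.List.pyRange 0 n 1).map (· + 1) with hsdef
  have hreq : PySem.List.pyRange 1 (n + 1) 1 = s := by
    rw [hsdef, PySem.List.pyRange_one, PySem.List.pyRange_one, List.map_map]
    rw [show n + 1 - 1 = n - 0 from by ring]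
    apply List.map_congr_left
    intro k _
    simp
    ring
  have hsort : s.Pairwise (· < ·) := by
    exact List.Pairwise.map _ (fun a b hab => by omega)
      (PySem.List.pairwise_lt_pyRange_one 0 n)
  have hnodup : s.Nodup := hsort.imp (fun h => ne_of_lt h)
  have hsearch := pvSearch_eq c v a n s.length s le_rfl hnodup [] (1000000000, none)
    (by intro q hq; simp at hq)
  rw [pvGenPerms_eq n hn, ← hsdef, hreq]
  have h0 : ((([] : List Int).length : Nat) : Int) = 0 := by simp
  rw [h0] at hsearch
  rw [show (fun x => ([] : List Int) ++ x) = (id : List Int → List Int) from by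
        funext x; simp,
      List.map_id] at hsearch
  rw [hsearch]
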